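-- pv_equiv track=rewrite | github.com/zhafraan/PraktikumDaspro | Praktikum 7/hackker rank.py | dimensi
-- ===== SOURCE A (Python) =====
-- def isEmpty(L):
--     return L == []
--
-- def dimensi(L1,L2):
--     if isEmpty(L1) :
--         return 0
--     else:
--         if(FirstElmt(L1) > FirstElmt(L2)):
--             return 1+(dimensi(Tail(L1),Tail(L2)))
--         else:
--             return dimensi(Tail(L1),Tail(L2))
--
-- def FirstElmt(x):
--     if x != []:
--         return x[0]
--
-- def Tail(x):
--     if x != []:
--         return x[1:]
-- ===== SOURCE B (Python) =====
-- def dimensi(L1, L2):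
--     # Iterative one-pass count over the paired elements (extra L2 elements ignored).
--     count = 0
--     for a, b in zip(L1, L2):
--         if a > b:
--             count += 1
--     return count
-- ===== Notes on version B (the rewrite author's own statement) =====
-- stated objective: simpler
-- what changed: Replaces A's None-returning helper functions and deep recursion with a single iterative pass over zip(L1, L2) and a counter.
import Mathlib
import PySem

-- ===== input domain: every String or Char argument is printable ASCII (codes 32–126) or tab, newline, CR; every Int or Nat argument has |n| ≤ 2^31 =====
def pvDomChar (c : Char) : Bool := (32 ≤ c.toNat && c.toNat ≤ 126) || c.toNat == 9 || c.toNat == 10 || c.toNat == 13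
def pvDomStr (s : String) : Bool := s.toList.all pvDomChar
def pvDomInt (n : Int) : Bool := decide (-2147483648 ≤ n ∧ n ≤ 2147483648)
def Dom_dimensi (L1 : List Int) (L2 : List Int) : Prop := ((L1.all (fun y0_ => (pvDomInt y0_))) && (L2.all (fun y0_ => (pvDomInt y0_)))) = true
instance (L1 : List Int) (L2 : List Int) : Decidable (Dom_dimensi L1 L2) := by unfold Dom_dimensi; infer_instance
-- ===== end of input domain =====

-- B replaces A's recursive helper-based count with a single iterative pass over zip(L1,L2); objective: simpler.


-- ===== PORT A =====
-- A recurses: 0 on empty L1, else compare the heads and recurse on the tails.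
-- When L1 ≠ [] and L2 = [] Python compares int > None and raises TypeError; that
-- case is excluded by Pre_dimensi (the branch value 0 below is never claimed).
def dimensi (L1 : List Int) (L2 : List Int) : Int :=
  match L1, L2 with
  | [], _ => 0
  | _ :: _, [] => 0      -- Python raises TypeError here; outside Pre_dimensi
  | a :: t1, b :: t2 => if a > b then 1 + dimensi t1 t2 else dimensi t1 t2

-- ===== PORT B =====
-- one pass over the zipped pairs, counting a > b
def dimensi_alt (L1 : List Int) (L2 : List Int) : Int :=
  (L1.zip L2).foldl (fun count p => if p.1 > p.2 then count + 1 else count) 0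

-- ===== PRECONDITION & SPEC =====
-- A raises TypeError (int > None) as soon as L1 outlives L2; Pre_ admits exactly the inputs where A returns.
def Pre_dimensi (L1 : List Int) (L2 : List Int) : Prop := L1.length ≤ L2.length
instance (L1 : List Int) (L2 : List Int) : Decidable (Pre_dimensi L1 L2) := by unfold Pre_dimensi; infer_instance
def pvWitness_dimensi : List Int × List Int := ([3, 1, 5], [2, 2, 2])

def Spec_dimensi (L1 : List Int) (L2 : List Int) (out : Int) : Prop := out = dimensi_alt L1 L2
instance (L1 : List Int) (L2 : List Int) (out : Int) : Decidable (Spec_dimensi L1 L2 out) := by unfold Spec_dimensi; infer_instance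

-- ===== CLAIM (what is proved, stated in full; the proofs are below) =====
def Claim_equal_dimensi : Prop := ∀ (L1 : List Int) (L2 : List Int), Dom_dimensi L1 L2 → Pre_dimensi L1 L2 → Spec_dimensi L1 L2 (dimensi L1 L2)

-- ===== LEMMAS AND PROOFS =====
-- B's fold shifted by an arbitrary accumulator
theorem dimensi_alt_fold_acc (L1 L2 : List Int) (c : Int) :
    (L1.zip L2).foldl (fun count p => if p.1 > p.2 then count + 1 else count) c
      = c + (L1.zip L2).foldl (fun count p => if p.1 > p.2 then count + 1 else count) 0 := by
  induction L1 generalizing L2 c with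
  | nil => simp
  | cons a t1 ih =>
    cases L2 with
    | nil => simp
    | cons b t2 =>
      simp only [List.zip_cons_cons, List.foldl_cons]
      rw [ih t2, ih t2 (if a > b then (0 : Int) + 1 else 0)]
      split_ifs <;> ring

theorem dimensi_eq_alt (L1 L2 : List Int) (h : L1.length ≤ L2.length) :
    dimensi L1 L2 = dimensi_alt L1 L2 := by
  induction L1 generalizing L2 with
  | nil => simp [dimensi, dimensi_alt]
  | cons a t1 ih =>
    cases L2 with
    | nil => simp at h
    | cons b t2 =>
      simp only [List.length_cons, Nat.add_le_add_iff_right] at h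
      simp only [dimensi, dimensi_alt, List.zip_cons_cons, List.foldl_cons]
      rw [dimensi_alt_fold_acc t1 t2, ih t2 h]
      unfold dimensi_alt
      split_ifs <;> ring

-- ===== VERDICT (by name: the statement is the Claim_ definition above) =====
theorem dimensi_spec : Claim_equal_dimensi := by
  intro L1 L2 _ hpre
  exact dimensi_eq_alt L1 L2 hpre
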